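-- pv_equiv track=rewrite | github.com/Alan011337/haven-app | backend/app/services/ai.py | normalize_shared_future_similarity_text
-- ===== SOURCE A (Python) =====
-- import unicodedata
--
-- def normalize_shared_future_similarity_text(value: str) -> str:
--     normalized = unicodedata.normalize("NFKC", value or "").lower().strip()
--     if not normalized:
--         return ""
--
--     folded_chars: list[str] = []
--     for char in normalized:
--         if char.isspace():
--             folded_chars.append(" ")
--             continue
--
--         category = unicodedata.category(char)
--         if category.startswith(("P", "S")):
--             folded_chars.append(" ")
--             continue
--
--         folded_chars.append(char)
--
--     return " ".join("".join(folded_chars).split())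
-- ===== SOURCE B (Python) =====
-- import unicodedata
--
-- def normalize_shared_future_similarity_text(value: str) -> str:
--     # Single pass: tokenize words directly instead of building a folded
--     # string and re-scanning it with split().
--     normalized = unicodedata.normalize("NFKC", value or "").lower().strip()
--     words: list[str] = []
--     buf: list[str] = []
--     for ch in normalized:
--         if not ch.isspace() and not unicodedata.category(ch).startswith(("P", "S")):
--             buf.append(ch)
--         elif buf:
--             words.append("".join(buf))
--             buf = []
--     if buf:
--         words.append("".join(buf))
--     return " ".join(words)
-- ===== Notes on version B (the rewrite author's own statement) =====
-- stated objective: simpler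
-- what changed: B tokenizes words in a single pass with a running buffer (flush on separator, flush at end) instead of A's build-a-folded-string then re-scan it with split()/join(); A's early empty-return and intermediate folded list disappear.
import Mathlib
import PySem

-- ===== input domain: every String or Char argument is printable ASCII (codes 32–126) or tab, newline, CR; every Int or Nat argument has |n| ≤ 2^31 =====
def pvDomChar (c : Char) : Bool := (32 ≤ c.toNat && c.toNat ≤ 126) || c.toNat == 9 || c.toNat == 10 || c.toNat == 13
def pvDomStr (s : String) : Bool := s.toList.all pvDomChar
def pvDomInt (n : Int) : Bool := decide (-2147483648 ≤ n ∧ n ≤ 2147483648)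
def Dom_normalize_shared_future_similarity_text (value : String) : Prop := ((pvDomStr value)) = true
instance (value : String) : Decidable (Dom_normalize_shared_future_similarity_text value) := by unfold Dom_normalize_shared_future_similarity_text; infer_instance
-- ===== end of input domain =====

-- B replaces A's fold-into-a-string-then-split()/join() re-scan by a single-pass word tokenizer (running buffer, flush on separator); same return value.

-- ===== PORT A =====
-- unicodedata.category(c).startswith(("P","S")) — exact for every character reachable inside Dom
-- (printable ASCII/tab/newline/CR): exactly the printable non-space non-alphanumeric ASCII characters.
def pvIsPS (c : Char) : Bool := 33 ≤ c.toNat && c.toNat ≤ 126 && !PySem.Chars.isalnum c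

-- unicodedata.normalize("NFKC", ·) is the identity on Dom's characters (all ASCII), so the port
-- starts from .lower().strip(); 'value or ""' is 'value' for a String argument.
def normalize_shared_future_similarity_text (value : String) : String :=
  let normalized := PySem.Chars.strip (PySem.Chars.lower value.toList)
  if normalized.isEmpty then "" else
  let folded := normalized.foldl (fun acc c =>
      if PySem.Chars.isspace c then acc ++ [' ']
      else if pvIsPS c then acc ++ [' ']
      else acc ++ [c]) []
  String.ofList (PySem.Chars.join [' '] (PySem.Chars.split₀ folded))

-- ===== PORT B =====
-- one step of Source B's loop: keep the char in the buffer, or flush the buffer as a completed word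
def pvAltStep (st : List (List Char) × List Char) (c : Char) : List (List Char) × List Char :=
  if !PySem.Chars.isspace c && !pvIsPS c then (st.1, st.2 ++ [c])
  else if st.2.isEmpty then st
  else (st.1 ++ [st.2], [])

def normalize_shared_future_similarity_text_alt (value : String) : String :=
  let normalized := PySem.Chars.strip (PySem.Chars.lower value.toList)
  let st := normalized.foldl pvAltStep ([], [])
  let words := if st.2.isEmpty then st.1 else st.1 ++ [st.2]
  String.ofList (PySem.Chars.join [' '] words)

-- ===== PRECONDITION & SPEC =====
def Spec_normalize_shared_future_similarity_text (value : String) (out : String) : Prop := out = normalize_shared_future_similarity_text_alt value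
instance (value : String) (out : String) : Decidable (Spec_normalize_shared_future_similarity_text value out) := by unfold Spec_normalize_shared_future_similarity_text; infer_instance

-- ===== CLAIM (what is proved, stated in full; the proofs are below) =====
def Claim_equal_normalize_shared_future_similarity_text : Prop := ∀ (value : String), Dom_normalize_shared_future_similarity_text value → Spec_normalize_shared_future_similarity_text value (normalize_shared_future_similarity_text value)

-- ===== LEMMAS AND PROOFS =====

-- the character A's fold writes for c
def pvFold (c : Char) : Char :=
  if PySem.Chars.isspace c then ' ' else if pvIsPS c then ' ' else c

lemma pvFoldA_eq_map (s : List Char) :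
    s.foldl (fun acc c =>
      if PySem.Chars.isspace c then acc ++ [' ']
      else if pvIsPS c then acc ++ [' ']
      else acc ++ [c]) [] = s.map pvFold := by
  have h := PySem.List.foldl_congr_mem
      (f := fun acc c =>
        if PySem.Chars.isspace c then acc ++ [' ']
        else if pvIsPS c then acc ++ [' ']
        else acc ++ [c])
      (g := fun acc c => acc ++ [pvFold c]) (l := s) (init := ([] : List Char))
      (by intro acc c _; simp [pvFold]; split_ifs <;> rfl)
  rw [h, PySem.List.foldl_append_singleton_eq_map]
  simp

lemma pvIsspace_fold (c : Char) :
    PySem.Chars.isspace (pvFold c) = (PySem.Chars.isspace c || pvIsPS c) := by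
  unfold pvFold
  by_cases h1 : PySem.Chars.isspace c <;> by_cases h2 : pvIsPS c <;>
    simp [h1, h2] <;> decide

-- A's split₀ over the folded string computes exactly B's tokenizer loop (with the final flush)
lemma pvGo_eq_loop (s : List Char) :
    ∀ (words : List (List Char)) (buf : List Char),
    PySem.Chars.split₀.go (s.map pvFold) buf.reverse words.reverse
      = (let st := s.foldl pvAltStep (words, buf);
         if st.2.isEmpty then st.1 else st.1 ++ [st.2]) := by
  induction s with
  | nil =>
      intro words buf
      cases buf <;> simp [PySem.Chars.split₀.go]
  | cons c s ih =>
      intro words buf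
      simp only [List.map_cons, List.foldl_cons]
      by_cases hk : (!PySem.Chars.isspace c && !pvIsPS c) = true
      · have hns : PySem.Chars.isspace c = false := by
          cases hsp : PySem.Chars.isspace c <;> simp_all
        have hps : pvIsPS c = false := by
          cases hsp : pvIsPS c <;> simp_all
        have hf : pvFold c = c := by simp [pvFold, hns, hps]
        have hstep : pvAltStep (words, buf) c = (words, buf ++ [c]) := by
          simp [pvAltStep, hk]
        rw [hstep]
        have hL : PySem.Chars.split₀.go (pvFold c :: List.map pvFold s) buf.reverse words.reverse
            = PySem.Chars.split₀.go (List.map pvFold s) (buf ++ [c]).reverse words.reverse := by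
          simp [PySem.Chars.split₀.go, hf, hns]
        rw [hL]
        exact ih words (buf ++ [c])
      · have hfs : PySem.Chars.isspace (pvFold c) = true := by
          rw [pvIsspace_fold]
          cases hsp : PySem.Chars.isspace c <;> cases hps : pvIsPS c <;> simp_all
        by_cases hb : buf = []
        · subst hb
          have hstep : pvAltStep (words, ([] : List Char)) c = (words, []) := by
            simp [pvAltStep, hk]
          rw [hstep]
          have hL : PySem.Chars.split₀.go (pvFold c :: List.map pvFold s)
                ([] : List Char).reverse words.reverse
              = PySem.Chars.split₀.go (List.map pvFold s) ([] : List Char).reverse words.reverse := by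
            simp [PySem.Chars.split₀.go, hfs]
          rw [hL]
          exact ih words []
        · have hstep : pvAltStep (words, buf) c = (words ++ [buf], []) := by
            simp [pvAltStep, hk, hb]
          rw [hstep]
          have hL : PySem.Chars.split₀.go (pvFold c :: List.map pvFold s) buf.reverse words.reverse
              = PySem.Chars.split₀.go (List.map pvFold s) ([] : List Char).reverse
                  (words ++ [buf]).reverse := by
            simp [PySem.Chars.split₀.go, hfs, hb]
          rw [hL]
          exact ih (words ++ [buf]) []

-- ===== VERDICT (by name: the statement is the Claim_ definition above) =====
theorem normalize_shared_future_similarity_text_spec : Claim_equal_normalize_shared_future_similarity_text := by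
  intro value _
  unfold Spec_normalize_shared_future_similarity_text
  unfold normalize_shared_future_similarity_text normalize_shared_future_similarity_text_alt
  set n := PySem.Chars.strip (PySem.Chars.lower value.toList) with hn
  by_cases h : n.isEmpty
  · have h' : n = [] := by simpa using h
    simp [h', PySem.Chars.join, List.intercalate]
  · simp only [h, Bool.false_eq_true, if_false]
    rw [pvFoldA_eq_map]
    have hgo := pvGo_eq_loop n [] []
    simp only [List.reverse_nil] at hgo
    rw [PySem.Chars.split₀, hgo]
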